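-- pv_equiv track=rewrite | github.com/SoneyBoney/advent_of_code_2022 | day22/day22.py | get_next_token
-- ===== SOURCE A (Python) =====
-- def get_next_token(line: str):
--     ret = []
--     for i in range(len(line)):
--         if not line[i].isnumeric():
--             yield line[i]
--         else:
--             ret.append(line[i])
--             try:
--                 if not line[i+1].isnumeric():
--                     yield ''.join(ret)
--                     ret = []
--             except IndexError:
--                 yield ''.join(ret)
-- ===== SOURCE B (Python) =====
-- def get_next_token(line: str):
--     i = 0
--     n = len(line)
--     while i < n:
--         if line[i].isnumeric():
--             j = i
--             while j < n and line[j].isnumeric():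
--                 j += 1
--             yield line[i:j]
--             i = j
--         else:
--             yield line[i]
--             i += 1
-- ===== Notes on version B (the rewrite author's own statement) =====
-- stated objective: simpler
-- what changed: Replaced the per-character loop with a pending-digits accumulator, index lookahead line[i+1] and try/except IndexError sentinel by a two-pointer scan that extracts each maximal digit run as one slice and yields non-digit characters directly.
import Mathlib
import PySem

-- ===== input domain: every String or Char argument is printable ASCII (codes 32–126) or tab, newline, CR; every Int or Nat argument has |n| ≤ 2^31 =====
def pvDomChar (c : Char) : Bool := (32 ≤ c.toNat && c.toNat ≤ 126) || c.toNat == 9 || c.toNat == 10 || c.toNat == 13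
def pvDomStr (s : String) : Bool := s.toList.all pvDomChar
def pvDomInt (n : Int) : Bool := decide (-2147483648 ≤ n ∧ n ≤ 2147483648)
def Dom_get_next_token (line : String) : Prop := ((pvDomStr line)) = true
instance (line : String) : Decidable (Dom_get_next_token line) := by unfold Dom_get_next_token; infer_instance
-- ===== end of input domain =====

-- B replaces A's pending-digits accumulator + line[i+1] lookahead + IndexError sentinel by a
-- two-pointer scan over maximal digit runs (objective: simpler). On the ASCII domain Dom_,
-- str.isnumeric coincides with PySem.Chars.isdigit, which both ports use.

-- ===== PORT A =====
-- A's loop over i with the peek line[i+1]: the peek is the head of the remaining suffix;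
-- the `rest = []` branch is the IndexError branch. `ret` is the pending-digits list.
def pvALoop (cs : List Char) (ret : List Char) : List String :=
  match cs with
  | [] => []
  | c :: rest =>
    if ¬ PySem.Chars.isdigit c then String.ofList [c] :: pvALoop rest ret
    else
      match rest with
      | [] => [String.ofList (ret ++ [c])]                     -- line[i+1] raises IndexError
      | d :: _ =>
        if ¬ PySem.Chars.isdigit d then String.ofList (ret ++ [c]) :: pvALoop rest []
        else pvALoop rest (ret ++ [c])

def get_next_token (line : String) : List String := pvALoop line.toList []

-- ===== PORT B =====
-- two-pointer scan: slice out each maximal digit run, yield non-digit chars singly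
def pvBLoop (cs : List Char) : List String :=
  match cs with
  | [] => []
  | c :: rest =>
    if PySem.Chars.isdigit c then
      String.ofList (c :: rest.takeWhile PySem.Chars.isdigit)
        :: pvBLoop (rest.dropWhile PySem.Chars.isdigit)
    else String.ofList [c] :: pvBLoop rest
termination_by cs.length
decreasing_by
  · simpa using Nat.lt_succ_of_le (List.length_dropWhile_le _ _)
  · simp

def get_next_token_alt (line : String) : List String := pvBLoop line.toList

-- ===== PRECONDITION & SPEC =====
def Spec_get_next_token (line : String) (out : List String) : Prop := out = get_next_token_alt line
instance (line : String) (out : List String) : Decidable (Spec_get_next_token line out) := by unfold Spec_get_next_token; infer_instance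

-- ===== CLAIM (what is proved, stated in full; the proofs are below) =====
def Claim_equal_get_next_token : Prop := ∀ (line : String), Dom_get_next_token line → Spec_get_next_token line (get_next_token line)

-- ===== LEMMAS AND PROOFS =====

-- B's loop with a pending prefix `ret` glued onto the FIRST digit-run token (matches how
-- A's accumulator flows through the scan).
def pvInj (ret : List Char) (cs : List Char) : List String :=
  match cs with
  | [] => []
  | c :: rest =>
    if PySem.Chars.isdigit c then
      String.ofList (ret ++ c :: rest.takeWhile PySem.Chars.isdigit)
        :: pvBLoop (rest.dropWhile PySem.Chars.isdigit)
    else String.ofList [c] :: pvInj ret rest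

theorem pvInj_nil : ∀ (cs : List Char), pvInj [] cs = pvBLoop cs
  | [] => by rw [pvInj.eq_def, pvBLoop.eq_def]
  | c :: rest => by
    rw [pvInj.eq_def, pvBLoop.eq_def]
    cases h : PySem.Chars.isdigit c
    · simp [h, pvInj_nil rest]
    · simp [h]

theorem pvALoop_eq_inj : ∀ (cs ret : List Char), pvALoop cs ret = pvInj ret cs
  | [], ret => by rw [pvALoop.eq_def, pvInj.eq_def]
  | c :: rest, ret => by
    cases hc : PySem.Chars.isdigit c
    · rw [pvALoop.eq_def, pvInj.eq_def]
      simp [hc, pvALoop_eq_inj rest ret]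
    · cases rest with
      | nil =>
        rw [pvALoop.eq_def, pvInj.eq_def]
        simp [hc, List.takeWhile, List.dropWhile, pvBLoop]
      | cons d rest' =>
        cases hd : PySem.Chars.isdigit d
        · rw [pvALoop.eq_def, pvInj.eq_def]
          simp [hc, hd, pvALoop_eq_inj (d :: rest') [], pvInj_nil,
            List.takeWhile, List.dropWhile]
        · rw [pvALoop.eq_def, pvInj.eq_def]
          simp [hc, hd, pvALoop_eq_inj (d :: rest') (ret ++ [c]), pvInj.eq_def,
            List.takeWhile, List.dropWhile]

-- ===== VERDICT (by name: the statement is the Claim_ definition above) =====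
theorem get_next_token_spec : Claim_equal_get_next_token := by
  intro line _
  unfold Spec_get_next_token get_next_token get_next_token_alt
  rw [pvALoop_eq_inj, pvInj_nil]
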